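-- pv_equiv track=rewrite | github.com/sosolog/algo-study | lv2/1주차/basic/BOJ_14562_태권왕_PSH.py | dfs
-- ===== SOURCE A (Python) =====
-- from collections import deque
--
-- def dfs(a, b):
--     stack = deque()
--     stack.append((a, b, 0))
--
--     candid = list()
--     while len(stack) > 0:
--         a, b, count = stack.popleft()
--         if a == b:
--             candid.append(count)
--         elif a < b:
--             stack.append((a * 2, b + 3, count + 1))
--             stack.append((a + 1, b, count + 1))
--     return str(min(candid))
-- ===== SOURCE B (Python) =====
-- def dfs(a, b):
--     def go(a, b):
--         # minimal number of ops from state (a, b), or None if a has overshot b;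
--         # walks the +1 chain iteratively and recurses only on the doubling branch
--         if a > b:
--             return None
--         best = b - a                     # reach b using +1 steps only
--         for k in range(b - a):           # k +1-steps, then one doubling
--             d = go((a + k) * 2, b + 3)
--             if d is not None and k + 1 + d < best:
--                 best = k + 1 + d
--         return best
--     best = go(a, b)
--     if best is None:
--         raise ValueError("no solution")
--     return str(best)
-- ===== Notes on version B (the rewrite author's own statement) =====
-- stated objective: alternative
-- what changed: A runs a FIFO queue over the whole branching tree, appends every count at which a==b to a list and finally returns the min of that list; B computes the minimum directly: it walks the +1 chain with a loop, recurses only on the doubling branch (returning None for overshot states), and keeps a running best, so no queue and no candidate list exist.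
import Mathlib
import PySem

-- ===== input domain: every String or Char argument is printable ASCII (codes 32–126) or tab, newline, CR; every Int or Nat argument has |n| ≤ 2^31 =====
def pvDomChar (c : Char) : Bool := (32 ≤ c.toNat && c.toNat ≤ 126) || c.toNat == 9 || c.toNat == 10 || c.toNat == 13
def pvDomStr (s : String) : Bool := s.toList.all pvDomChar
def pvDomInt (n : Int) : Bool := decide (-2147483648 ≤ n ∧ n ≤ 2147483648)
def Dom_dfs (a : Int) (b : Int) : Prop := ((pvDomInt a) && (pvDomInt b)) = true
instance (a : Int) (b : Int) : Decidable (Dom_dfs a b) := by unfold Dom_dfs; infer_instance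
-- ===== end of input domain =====

-- B replaces A's exhaustive queue enumeration (collect every success count, take min) by a
-- direct recursion returning the minimum directly; return-value equivalence proved on Pre_.

-- ===== PORT A =====
-- while-loop over the FIFO queue, ported as fuel recursion; `none` = fuel ran out
-- (the fuel is proved sufficient on Pre_; outside Pre_ the Python loop diverges or min([]) raises).
def loopA : ℕ → List (Int × Int × Int) → List Int → Option (List Int)
  | 0, _, _ => none
  | _ + 1, [], cand => some cand
  | f + 1, (a, b, c) :: q, cand =>
      if a = b then loopA f q (cand ++ [c])
      else if a < b then loopA f (q ++ [(a * 2, b + 3, c + 1), (a + 1, b, c + 1)]) cand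
      else loopA f q cand

def fuelA (a b : Int) : ℕ := 3 ^ ((2 * (b - a) + 9).toNat) + 1

def dfs (a : Int) (b : Int) : String :=
  match loopA (fuelA a b) [(a, b, 0)] [] with
  | some cand =>
      match PySem.List.min? cand (fun x => x) with
      | some m => PySem.Int.toStr m      -- str(min(candid))
      | none => ""                       -- min([]) raises ValueError (excluded by Pre_)
  | none => ""                           -- loop does not terminate (excluded by Pre_)

-- ===== PORT B =====
-- the recursion `go` of Source B, ported with fuel (proved sufficient on Pre_)
def goB : ℕ → Int → Int → Option Int
  | 0, _, _ => none
  | f + 1, a, b =>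
      if b < a then none
      else some ((PySem.List.pyRange 0 (b - a) 1).foldl
        (fun best k =>
          match goB f ((a + k) * 2) (b + 3) with
          | some d => if k + 1 + d < best then k + 1 + d else best
          | none => best) (b - a))

def fuelB (a b : Int) : ℕ := (2 * (b - a) + 9).toNat + 1

def dfs_alt (a : Int) (b : Int) : String :=
  match goB (fuelB a b) a b with
  | some v => PySem.Int.toStr v
  | none => ""                           -- raise ValueError (excluded by Pre_)

-- ===== PRECONDITION & SPEC =====
-- Pre_ excludes a > b (A's min([]) raises ValueError) and a ≤ 0 < b (A's loop never terminates:
-- the branch (a*2, b+3) keeps a ≤ 0 while b grows forever). A returns on exactly Pre_.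
def Pre_dfs (a : Int) (b : Int) : Prop := a = b ∨ (1 ≤ a ∧ a < b)
instance (a : Int) (b : Int) : Decidable (Pre_dfs a b) := by unfold Pre_dfs; infer_instance
def pvWitness_dfs : Int × Int := (2, 7)

def Spec_dfs (a : Int) (b : Int) (out : String) : Prop := out = dfs_alt a b
instance (a : Int) (b : Int) (out : String) : Decidable (Spec_dfs a b out) := by unfold Spec_dfs; infer_instance

-- ===== CLAIM (what is proved, stated in full; the proofs are below) =====
def Claim_equal_dfs : Prop := ∀ (a : Int) (b : Int), Dom_dfs a b → Pre_dfs a b → Spec_dfs a b (dfs a b)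

-- ===== LEMMAS AND PROOFS =====

-- proof-only potential function bounding the recursion/loop depth
def p9 (a : Int) : Int := if a ≤ 1 then 9 else if a = 2 then 4 else if a = 3 then 1 else 0
def phi (a b : Int) : ℕ := (2 * (b - a) + p9 a).toNat

lemma phi_pos (a b : Int) (h1 : 1 ≤ a) (h2 : a < b) : 2 ≤ phi a b := by
  unfold phi p9; split_ifs <;> omega

lemma phi_double (a b : Int) (h1 : 1 ≤ a) (h2 : a < b) :
    phi (a * 2) (b + 3) < phi a b := by
  unfold phi p9; split_ifs <;> omega

lemma phi_succ (a b : Int) (h1 : 1 ≤ a) (h2 : a < b) :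
    phi (a + 1) b < phi a b := by
  unfold phi p9; split_ifs <;> omega

lemma phi_le_fuelB (a b : Int) : phi a b < fuelB a b := by
  unfold phi p9 fuelB; split_ifs <;> omega

lemma goB_dead (f : ℕ) (a b : Int) (h : b < a) : goB f a b = none := by
  cases f with
  | zero => rfl
  | succ f => simp only [goB, if_pos h]

lemma phi_le_exp (a b : Int) : phi a b ≤ (2 * (b - a) + 9).toNat := by
  unfold phi p9; split_ifs <;> omega

lemma phi_anti (x y b : Int) (h : x ≤ y) : phi y b ≤ phi x b := by
  unfold phi p9; split_ifs <;> omega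

-- 'if d is not None and w < best: best = w', as a function of the optional weight
def omin (b : Int) : Option Int → Int
  | some w => if w < b then w else b
  | none => b

lemma omin_none (b : Int) : omin b none = b := rfl

lemma omin_min (b w : Int) : omin b (some w) = min b w := by
  simp only [omin]
  omega

lemma goB_step (f : ℕ) (a b : Int) :
    (fun (best k : Int) =>
      match goB f ((a + k) * 2) (b + 3) with
      | some d => if k + 1 + d < best then k + 1 + d else best
      | none => best) =
    (fun (best k : Int) =>
      omin best ((goB f ((a + k) * 2) (b + 3)).map (fun d => k + 1 + d))) := by
  funext best k
  cases goB f ((a + k) * 2) (b + 3) <;> rfl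

lemma fold_congr (l : List Int) : ∀ (w w' : Int → Option Int) (init : Int),
    (∀ k ∈ l, w k = w' k) →
    l.foldl (fun b k => omin b (w k)) init = l.foldl (fun b k => omin b (w' k)) init := by
  induction l with
  | nil => intro w w' init _; rfl
  | cons x t ih =>
      intro w w' init hw
      simp only [List.foldl_cons]
      rw [hw x (List.mem_cons_self), ih w w' _ (fun k hk => hw k (List.mem_cons_of_mem _ hk))]

lemma fold_min_init (w : Int → Option Int) (l : List Int) : ∀ (x y : Int),
    l.foldl (fun b k => omin b (w k)) (min x y) =
    min x (l.foldl (fun b k => omin b (w k)) y) := by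
  induction l with
  | nil => intro x y; rfl
  | cons z t ih =>
      intro x y
      simp only [List.foldl_cons]
      cases hz : w z with
      | none => simp only [omin]; exact ih x y
      | some d =>
          rw [omin_min, omin_min, min_assoc]
          exact ih x (min y d)

lemma fold_add_one (w : Int → Option Int) (l : List Int) : ∀ (init : Int),
    l.foldl (fun b k => omin b ((w k).map (fun d => d + 1))) (init + 1) =
    (l.foldl (fun b k => omin b (w k)) init) + 1 := by
  induction l with
  | nil => intro init; rfl
  | cons z t ih =>
      intro init
      simp only [List.foldl_cons]
      cases hz : w z with
      | none => simp only [Option.map_none, omin]; exact ih init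
      | some d =>
          simp only [Option.map_some, omin_min]
          rw [min_add_add_right, ih]

lemma fold_shift (w : Int → Option Int) (n : Int) (init : Int) :
    (PySem.List.pyRange 1 (n + 1) 1).foldl (fun b k => omin b (w k)) init =
    (PySem.List.pyRange 0 n 1).foldl (fun b k => omin b (w (k + 1))) init := by
  rw [PySem.List.pyRange_one, PySem.List.pyRange_one]
  have h1 : (n + 1 - 1) = n := by omega
  have h2 : (n - 0) = n := by omega
  rw [h1, h2, List.foldl_map, List.foldl_map]
  congr 1
  funext bb kk
  have h3 : (1 : Int) + (kk : Int) = 0 + (kk : Int) + 1 := by ring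
  rw [h3]

lemma goB_stable : ∀ (f : ℕ) (a b : Int) (f' : ℕ), 1 ≤ a → a ≤ b →
    phi a b < f → phi a b < f' → goB f a b = goB f' a b ∧ (goB f a b).isSome := by
  intro f
  induction f using Nat.strong_induction_on with
  | _ f ih =>
    intro a b f' h1 h2 hf hf'
    obtain ⟨g, rfl⟩ : ∃ g, f = g + 1 := ⟨f - 1, by omega⟩
    obtain ⟨g', rfl⟩ : ∃ g', f' = g' + 1 := ⟨f' - 1, by omega⟩
    simp only [goB, if_neg (by omega : ¬ b < a), goB_step, Option.isSome_some, and_true]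
    congr 1
    apply fold_congr
    intro k hk
    have hk' : 0 ≤ k ∧ k < b - a := (PySem.List.mem_pyRange_one.mp hk).imp (by omega) id
    by_cases hd : b + 3 < (a + k) * 2
    · rw [goB_dead _ _ _ hd, goB_dead _ _ _ hd]
    · have hlt : a < b := by omega
      have hmono : phi ((a + k) * 2) (b + 3) ≤ phi (a * 2) (b + 3) :=
        phi_anti _ _ _ (by omega)
      have hdb := phi_double a b h1 hlt
      rw [(ih g (by omega) ((a + k) * 2) (b + 3) g' (by omega) (by omega)
        (by omega) (by omega)).1]

def FB (a b : Int) : Option Int := goB (fuelB a b) a b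

def optMin : Option Int → Option Int → Option Int
  | none, y => y
  | some l, none => some l
  | some l, some r => some (min l r)

lemma FB_refl (a : Int) : FB a a = some 0 := by
  unfold FB fuelB
  simp only [goB, if_neg (by omega : ¬ a < a)]
  rw [PySem.List.pyRange_one_eq_nil (by omega)]
  simp

lemma FB_some (a b : Int) (h2 : a ≤ b) : ∃ v, FB a b = some v := by
  unfold FB fuelB
  simp only [goB, if_neg (by omega : ¬ b < a)]
  exact ⟨_, rfl⟩

lemma FB_dead (a b : Int) (h : b < a) : FB a b = none := goB_dead _ _ _ h

-- FB unfolded one level: the +1-chain fold, with the inner calls stabilized to FB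
lemma FB_unfold (a b : Int) (h1 : 1 ≤ a) (h2 : a ≤ b) :
    FB a b = some ((PySem.List.pyRange 0 (b - a) 1).foldl
      (fun best k => omin best ((FB ((a + k) * 2) (b + 3)).map (fun d => k + 1 + d)))
      (b - a)) := by
  conv_lhs => unfold FB fuelB
  conv_lhs => rw [goB]
  rw [if_neg (by omega : ¬ b < a), goB_step]
  congr 1
  apply fold_congr
  intro k hk
  have hk' : 0 ≤ k ∧ k < b - a := (PySem.List.mem_pyRange_one.mp hk).imp (by omega) id
  have hlt : a < b := by omega
  by_cases hd : b + 3 < (a + k) * 2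
  · rw [goB_dead _ _ _ hd, FB_dead _ _ hd]
  · have hmono : phi ((a + k) * 2) (b + 3) ≤ phi (a * 2) (b + 3) :=
      phi_anti _ _ _ (by omega)
    have hdb := phi_double a b h1 hlt
    have hN := phi_le_exp a b
    have := (goB_stable ((2 * (b - a) + 9).toNat) ((a + k) * 2) (b + 3)
      (fuelB ((a + k) * 2) (b + 3)) (by omega) (by omega) (by omega)
      (phi_le_fuelB _ _)).1
    rw [this]
    rfl

lemma FB_rec (a b : Int) (h1 : 1 ≤ a) (h2 : a < b) :
    FB a b = (optMin (FB (a * 2) (b + 3)) (FB (a + 1) b)).map (· + 1) := by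
  have e2 : b - (a + 1) = b - a - 1 := by omega
  have hB1 := FB_unfold (a + 1) b (by omega) (by omega)
  rw [e2] at hB1
  set c : Int := b - a - 1 with hc
  set w' : Int → Option Int :=
    fun k => (FB ((a + 1 + k) * 2) (b + 3)).map (fun d => k + 1 + d) with hw'
  rw [FB_unfold a b h1 (by omega)]
  set w : Int → Option Int :=
    fun k => (FB ((a + k) * 2) (b + 3)).map (fun d => k + 1 + d) with hw
  have hinit : b - a = c + 1 := by omega
  have hlist : PySem.List.pyRange 0 (b - a) 1 = 0 :: PySem.List.pyRange 1 (c + 1) 1 := by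
    rw [PySem.List.pyRange_one_cons (by omega : (0 : Int) < b - a),
      show (0 : Int) + 1 = 1 from by norm_num, hinit]
  rw [hlist, List.foldl_cons, hinit, fold_shift w c]
  have hshift : ∀ init : Int,
      (PySem.List.pyRange 0 c 1).foldl (fun best k => omin best (w (k + 1))) init =
      (PySem.List.pyRange 0 c 1).foldl
        (fun best k => omin best ((w' k).map (fun d => d + 1))) init := by
    intro init
    apply fold_congr
    intro k _
    rw [hw, hw']
    simp only [Option.map_map]
    have e3 : (a + (k + 1)) * 2 = (a + 1 + k) * 2 := by ring
    rw [e3]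
    congr 1
    funext d
    simp only [Function.comp]
    ring
  rw [hshift, show (a + 0) * 2 = a * 2 from by ring]
  cases hC : FB (a * 2) (b + 3) with
  | none =>
      rw [hB1]
      simp only [Option.map_none, omin_none, optMin, Option.map_some]
      rw [fold_add_one w']
  | some l0 =>
      rw [hB1]
      simp only [Option.map_some, omin_min, optMin]
      rw [show (0 : Int) + 1 + l0 = l0 + 1 from by ring, min_add_add_right,
        fold_add_one w', min_comm c l0, fold_min_init w' _ l0 c]

def mopt (l : List (Option Int)) : Option Int := l.foldr optMin none

lemma optMin_comm (x y : Option Int) : optMin x y = optMin y x := by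
  cases x <;> cases y <;> simp [optMin, min_comm]

lemma optMin_assoc (x y z : Option Int) :
    optMin (optMin x y) z = optMin x (optMin y z) := by
  cases x <;> cases y <;> cases z <;> simp [optMin, min_assoc]

lemma optMin_none_right (x : Option Int) : optMin x none = x := by
  cases x <;> rfl

lemma optMin_rotate (x y z : Option Int) :
    optMin (optMin x y) z = optMin y (optMin x z) := by
  rw [optMin_comm x y, optMin_assoc]

lemma optMin_left_comm (x y z : Option Int) :
    optMin x (optMin y z) = optMin y (optMin x z) := by
  rw [← optMin_assoc, optMin_comm x y, optMin_assoc]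

lemma mopt_append (l1 l2 : List (Option Int)) :
    mopt (l1 ++ l2) = optMin (mopt l1) (mopt l2) := by
  induction l1 with
  | nil => simp [mopt, optMin]
  | cons x t ih => simp only [mopt, List.foldr] at *; rw [List.cons_append, List.foldr_cons, ih, optMin_assoc]

lemma optMin_map_add (x y : Option Int) (k : Int) :
    (optMin x y).map (· + k) = optMin (x.map (· + k)) (y.map (· + k)) := by
  cases x <;> cases y <;> simp [optMin, min_add_add_right]

def Vnode (t : Int × Int × Int) : Option Int := (FB t.1 t.2.1).map (· + t.2.2)

def V (q : List (Int × Int × Int)) (cand : List Int) : Option Int :=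
  mopt (q.map Vnode ++ cand.map some)

def InvQ (q : List (Int × Int × Int)) : Prop := ∀ t ∈ q, 1 ≤ t.1 ∨ t.1 = t.2.1

lemma loopA_V : ∀ (f : ℕ) (q : List (Int × Int × Int)) (cand : List Int)
    (out : List Int), InvQ q → loopA f q cand = some out →
    mopt (out.map some) = V q cand := by
  intro f
  induction f with
  | zero => intro q cand out _ h; simp [loopA] at h
  | succ f ih =>
    intro q cand out hinv h
    cases q with
    | nil =>
      simp only [loopA, Option.some.injEq] at h
      subst h
      unfold V
      simp
    | cons t q =>
      obtain ⟨a, b, c⟩ := t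
      simp only [loopA] at h
      by_cases hab : a = b
      · rw [if_pos hab] at h
        subst hab
        rw [ih q (cand ++ [c]) out (fun t ht => hinv t (List.mem_cons_of_mem _ ht)) h]
        unfold V
        have hv : Vnode (a, a, c) = some c := by
          unfold Vnode
          rw [FB_refl]
          simp
        simp only [List.map_cons, List.map_append, List.map_cons, List.map_nil,
          List.cons_append, hv]
        have e1 : mopt (some c :: (List.map Vnode q ++ List.map some cand)) =
            optMin (some c) (mopt (List.map Vnode q ++ List.map some cand)) := rfl
        have e2 : mopt (List.map some cand ++ [some c]) =
            optMin (mopt (List.map some cand)) (some c) := by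
          rw [mopt_append]; congr 1
        rw [mopt_append, e1, e2, mopt_append]
        rw [optMin_comm (mopt (List.map some cand)) (some c)]
        exact optMin_left_comm _ _ _
      · rw [if_neg hab] at h
        have hmem : (1 ≤ a ∨ a = b) := by
          have := hinv (a, b, c) (List.mem_cons_self)
          simpa using this
        by_cases hlt : a < b
        · rw [if_pos hlt] at h
          have h1 : 1 ≤ a := by rcases hmem with h' | h'; exact h'; exact absurd h' hab
          have hinv' : InvQ (q ++ [(a * 2, b + 3, c + 1), (a + 1, b, c + 1)]) := by
            intro t ht
            rcases List.mem_append.mp ht with h' | h'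
            · exact hinv t (List.mem_cons_of_mem _ h')
            · simp only [List.mem_cons, List.not_mem_nil, or_false] at h'
              rcases h' with rfl | rfl
              · left; show (1 : Int) ≤ a * 2; omega
              · left; show (1 : Int) ≤ a + 1; omega
          rw [ih _ cand out hinv' h]
          unfold V
          have hnode : Vnode (a, b, c) =
              optMin (Vnode (a * 2, b + 3, c + 1)) (Vnode (a + 1, b, c + 1)) := by
            unfold Vnode
            simp only
            rw [FB_rec a b h1 hlt, Option.map_map, ← optMin_map_add]
            congr 1
            funext v
            simp [Function.comp]
            omega
          simp only [List.map_append, List.map_cons, List.map_nil]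
          have h2l : mopt [Vnode (a * 2, b + 3, c + 1), Vnode (a + 1, b, c + 1)] =
              optMin (Vnode (a * 2, b + 3, c + 1)) (Vnode (a + 1, b, c + 1)) := by
            show optMin _ (optMin _ none) = _
            rw [optMin_none_right]
          have e1 : mopt (Vnode (a, b, c) :: List.map Vnode q ++ List.map some cand) =
              optMin (Vnode (a, b, c)) (mopt (List.map Vnode q ++ List.map some cand)) := rfl
          rw [mopt_append, mopt_append, h2l, e1, mopt_append, hnode, optMin_rotate]
        · rw [if_neg hlt] at h
          rw [ih q cand out (fun t ht => hinv t (List.mem_cons_of_mem _ ht)) h]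
          unfold V
          have hv : Vnode (a, b, c) = none := by
            unfold Vnode
            rw [FB_dead a b (by omega)]
            rfl
          simp only [List.map_cons, List.cons_append, hv]
          show _ = optMin none _
          rfl

def M (q : List (Int × Int × Int)) : ℕ := (q.map (fun t => 3 ^ phi t.1 t.2.1)).sum

lemma loopA_term : ∀ (f : ℕ) (q : List (Int × Int × Int)) (cand : List Int),
    InvQ q → M q < f → ∃ out, loopA f q cand = some out := by
  intro f
  induction f with
  | zero => intro q cand _ h; omega
  | succ f ih =>
    intro q cand hinv hM
    cases q with
    | nil => exact ⟨cand, rfl⟩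
    | cons t q =>
      obtain ⟨a, b, c⟩ := t
      have hMc : M ((a, b, c) :: q) = 3 ^ phi a b + M q := by simp [M]
      have hpow : 1 ≤ 3 ^ phi a b := Nat.one_le_pow _ _ (by norm_num)
      simp only [loopA]
      by_cases hab : a = b
      · rw [if_pos hab]
        exact ih q (cand ++ [c]) (fun t ht => hinv t (List.mem_cons_of_mem _ ht)) (by omega)
      · rw [if_neg hab]
        by_cases hlt : a < b
        · rw [if_pos hlt]
          have h1 : 1 ≤ a := by
            have := hinv (a, b, c) (List.mem_cons_self)
            simp at this
            rcases this with h' | h'; exact h'; exact absurd h' hab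
          have hinv' : InvQ (q ++ [(a * 2, b + 3, c + 1), (a + 1, b, c + 1)]) := by
            intro t ht
            rcases List.mem_append.mp ht with h' | h'
            · exact hinv t (List.mem_cons_of_mem _ h')
            · simp only [List.mem_cons, List.not_mem_nil, or_false] at h'
              rcases h' with rfl | rfl
              · left; show (1 : Int) ≤ a * 2; omega
              · left; show (1 : Int) ≤ a + 1; omega
          apply ih _ cand hinv'
          have hMn : M (q ++ [(a * 2, b + 3, c + 1), (a + 1, b, c + 1)]) =
              M q + (3 ^ phi (a * 2) (b + 3) + 3 ^ phi (a + 1) b) := by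
            simp [M]
          have hk : 2 ≤ phi a b := phi_pos a b h1 hlt
          have h3 : 3 ^ phi a b = 3 * 3 ^ (phi a b - 1) := by
            rw [← pow_succ']
            congr 1
            omega
          have hb1 : 3 ^ phi (a * 2) (b + 3) ≤ 3 ^ (phi a b - 1) :=
            Nat.pow_le_pow_right (by norm_num) (by have := phi_double a b h1 hlt; omega)
          have hb2 : 3 ^ phi (a + 1) b ≤ 3 ^ (phi a b - 1) :=
            Nat.pow_le_pow_right (by norm_num) (by have := phi_succ a b h1 hlt; omega)
          have he : 1 ≤ 3 ^ (phi a b - 1) := Nat.one_le_pow _ _ (by norm_num)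
          omega
        · rw [if_neg hlt]
          exact ih q cand (fun t ht => hinv t (List.mem_cons_of_mem _ ht)) (by omega)

lemma foldl_min_comm (t : List Int) : ∀ (x y : Int),
    min x (t.foldl min y) = t.foldl min (min x y) := by
  induction t with
  | nil => intro x y; rfl
  | cons z t ih =>
      intro x y
      simp only [List.foldl_cons]
      rw [ih, ← min_assoc]

lemma mopt_map_some (x : Int) (t : List Int) :
    mopt ((x :: t).map some) = some (t.foldl min x) := by
  induction t generalizing x with
  | nil => rfl
  | cons y t ih =>
      simp only [List.map_cons, mopt, List.foldr_cons] at *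
      rw [ih y, List.foldl_cons]
      simp [optMin, foldl_min_comm]

lemma min?_eq_of_mopt (l : List Int) (v : Int)
    (h : mopt (l.map some) = some v) : PySem.List.min? l (fun x => x) = some v := by
  cases l with
  | nil => simp [mopt] at h
  | cons x t =>
      rw [PySem.List.min?_id_cons, ← mopt_map_some, h]

-- ===== VERDICT (by name: the statement is the Claim_ definition above) =====
theorem dfs_spec : Claim_equal_dfs := by
  intro a b _ hpre
  unfold Spec_dfs
  obtain ⟨v, hv⟩ : ∃ v, FB a b = some v := by
    rcases hpre with rfl | ⟨h1, h2⟩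
    · exact ⟨0, FB_refl a⟩
    · exact FB_some a b (le_of_lt h2)
  have hinv : InvQ [(a, b, (0 : Int))] := by
    intro t ht
    rw [List.mem_singleton] at ht
    subst ht
    rcases hpre with h' | ⟨h1, _⟩
    · right; exact h'
    · left; exact h1
  have hM : M [(a, b, (0 : Int))] < fuelA a b := by
    have h1 : M [(a, b, (0 : Int))] = 3 ^ phi a b := by simp [M]
    have h2 : 3 ^ phi a b ≤ 3 ^ ((2 * (b - a) + 9).toNat) :=
      Nat.pow_le_pow_right (by norm_num) (phi_le_exp a b)
    unfold fuelA
    omega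
  obtain ⟨out, hout⟩ := loopA_term (fuelA a b) [(a, b, 0)] [] hinv hM
  have hV := loopA_V (fuelA a b) _ _ _ hinv hout
  have hVi : V [(a, b, (0 : Int))] [] = some v := by
    unfold V Vnode
    simp only [List.map_cons, List.map_nil, List.append_nil, hv]
    show optMin (some (v + 0)) none = some v
    simp [optMin]
  rw [hVi] at hV
  have hmin := min?_eq_of_mopt out v hV
  have hv' : goB (fuelB a b) a b = some v := hv
  unfold dfs dfs_alt
  rw [hout, hv']
  simp [hmin]
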